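-- pv_equiv track=rewrite | github.com/leoesaul/Solve_Lin | solve_linV5.py | fillInLens
-- ===== SOURCE A (Python) =====
-- def fillInLens(m):
--     lens = {}
--
--     for ind in range(len(m)):
--         curr_len = len(m[ind])
--
--         if curr_len in lens:
--             lens[curr_len][0] += 1
--             lens[curr_len].append(ind)
--         else:
--             lens[curr_len] = [1, ind]
--
--     return lens
-- ===== SOURCE B (Python) =====
-- def fillInLens(m):
--     # For each distinct row length, in first-occurrence order, rescan the
--     # whole length list to collect all matching indices at once.
--     lens_of = [len(row) for row in m]
--     result = {}
--     for L in lens_of: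
--         if L not in result:
--             idxs = [i for i, x in enumerate(lens_of) if x == L]
--             result[L] = [len(idxs)] + idxs
--     return result
-- ===== Notes on version B (the rewrite author's own statement) =====
-- stated objective: alternative
-- what changed: Replaces A's single incremental bucket-and-count dict loop by a per-distinct-length strategy: precompute the list of row lengths, then for each length seen for the first time rescan that whole list once to collect all its indices and emit [count]+indices directly, never updating an existing entry.
import Mathlib
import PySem

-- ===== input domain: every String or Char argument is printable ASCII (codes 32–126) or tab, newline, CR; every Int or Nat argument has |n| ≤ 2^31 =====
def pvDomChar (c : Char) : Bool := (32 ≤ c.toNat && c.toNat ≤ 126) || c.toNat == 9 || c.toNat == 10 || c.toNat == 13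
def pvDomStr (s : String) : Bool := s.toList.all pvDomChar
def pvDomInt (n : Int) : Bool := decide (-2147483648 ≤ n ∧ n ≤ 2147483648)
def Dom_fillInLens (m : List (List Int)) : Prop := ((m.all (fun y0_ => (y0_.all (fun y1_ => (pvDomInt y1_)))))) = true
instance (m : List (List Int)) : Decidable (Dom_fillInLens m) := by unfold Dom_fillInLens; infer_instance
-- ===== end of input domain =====

-- B stages the work differently: it precomputes the row-length list, then for each first-seen length rescans that list to collect all its indices at once and emits count::indices, never updating an existing dict entry; same return value as A.


-- ===== PORT A =====
def fillInLens (m : List (List Int)) : List (Int × List Int) :=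
  ((PySem.List.pyRange 0 (PySem.List.len m) 1).foldl
    (fun lens ind =>
      let currLen : Int := PySem.List.len (PySem.List.pyGetD m ind [])
      if lens.contains currLen then
        -- lens[curr_len][0] += 1; lens[curr_len].append(ind)
        let v := lens.getD currLen []
        lens.insert currLen
          (PySem.List.pySetD v 0 (PySem.List.pyGetD v 0 0 + 1) ++ [ind])
      else
        lens.insert currLen [1, ind])
    (PySem.Dict.empty : PySem.Dict Int (List Int))).items

-- ===== PORT B =====
def fillInLens_alt (m : List (List Int)) : List (Int × List Int) :=
  -- lens_of = [len(row) for row in m]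
  let lensOf := m.map (fun row => PySem.List.len row)
  -- for L in lens_of: if L not in result: rescan lens_of for all indices of L
  (lensOf.foldl
    (fun res L =>
      if res.contains L then res
      else
        let idxs := ((PySem.List.enumerate lensOf).filter (fun p => p.2 == L)).map (·.1)
        res.insert L (PySem.List.len idxs :: idxs))
    (PySem.Dict.empty : PySem.Dict Int (List Int))).items

-- ===== PRECONDITION & SPEC =====
def Spec_fillInLens (m : List (List Int)) (out : List (Int × List Int)) : Prop := out = fillInLens_alt m
instance (m : List (List Int)) (out : List (Int × List Int)) : Decidable (Spec_fillInLens m out) := by unfold Spec_fillInLens; infer_instance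

-- ===== CLAIM (what is proved, stated in full; the proofs are below) =====
def Claim_equal_fillInLens : Prop := ∀ (m : List (List Int)), Dom_fillInLens m → Spec_fillInLens m (fillInLens m)

-- ===== LEMMAS AND PROOFS =====

/-- the indices (first components) of the pairs whose second component is L -/
def pvIdxsP (ps : List (Int × Int)) (L : Int) : List Int :=
  (ps.filter (fun p => p.2 == L)).map (·.1)

/-- the stored value for key L: count :: indices -/
def pvValP (ps : List (Int × Int)) (L : Int) : List Int :=
  ((pvIdxsP ps L).length : Int) :: pvIdxsP ps L

/-- A's loop body on an (index, length) pair -/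
def pvStepA (d : PySem.Dict Int (List Int)) (p : Int × Int) : PySem.Dict Int (List Int) :=
  if d.contains p.2 then
    let v := d.getD p.2 []
    d.insert p.2 (PySem.List.pySetD v 0 (PySem.List.pyGetD v 0 0 + 1) ++ [p.1])
  else
    d.insert p.2 [1, p.1]

theorem pvIdxsP_append (ps : List (Int × Int)) (p : Int × Int) (L : Int) :
    pvIdxsP (ps ++ [p]) L = pvIdxsP ps L ++ (if p.2 = L then [p.1] else []) := by
  simp only [pvIdxsP, List.filter_append, List.map_append]
  congr 1
  split_ifs with h <;> simp [h]

theorem pvIdxsP_nil_of_not_mem (ps : List (Int × Int)) (L : Int)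
    (h : L ∉ ps.map (·.2)) : pvIdxsP ps L = [] := by
  simp only [pvIdxsP, List.map_eq_nil_iff, List.filter_eq_nil_iff]
  intro p hp hL
  exact h (List.mem_map.mpr ⟨p, hp, by simpa using hL⟩)

theorem pySetD_head (a b : Int) (v : List Int) :
    PySem.List.pySetD (a :: v) 0 b = b :: v := by
  simp [PySem.List.pySetD, PySem.List.pySet?, PySem.List.pyIdx?]

/-- invariant of A's loop: keys and stored values after processing ps -/
theorem pvA_inv (ps : List (Int × Int)) :
    (ps.foldl pvStepA PySem.Dict.empty).keys = PySem.Set.ofList (ps.map (·.2)) ∧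
    ∀ L, (ps.foldl pvStepA PySem.Dict.empty).getD L []
        = if L ∈ ps.map (·.2) then pvValP ps L else [] := by
  induction ps using List.reverseRecOn with
  | nil => simp [PySem.Set.ofList_nil, PySem.Dict.keys_empty, PySem.Dict.getD_empty]
  | append_singleton ps p ih =>
    obtain ⟨hkeys, hget⟩ := ih
    rw [List.foldl_append, List.foldl_cons, List.foldl_nil]
    set d := ps.foldl pvStepA PySem.Dict.empty with hd
    have hcont : d.contains p.2 = decide (p.2 ∈ ps.map (·.2)) := by
      rw [PySem.Dict.contains_eq_decide_mem_keys, hkeys]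
      simp only [PySem.Set.mem_ofList]
    have hmemiff : ∀ L : Int, L ≠ p.2 → ((L ∈ (ps ++ [p]).map (·.2)) ↔ L ∈ ps.map (·.2)) := by
      intro L h; simp [h]
    have hvaleq : ∀ L : Int, L ≠ p.2 → pvValP (ps ++ [p]) L = pvValP ps L := by
      intro L h
      rw [pvValP, pvValP, pvIdxsP_append, if_neg (fun hh => h hh.symm)]
      simp
    constructor
    · -- keys
      rw [show ((ps ++ [p]).map (·.2)) = ps.map (·.2) ++ [p.2] by simp,
          PySem.Set.ofList_append_singleton, ← hkeys]
      by_cases hm : p.2 ∈ ps.map (·.2)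
      · have hc : d.contains p.2 = true := by rw [hcont]; exact decide_eq_true hm
        have : PySem.Set.add d.keys p.2 = d.keys := by
          simp [PySem.Set.add, PySem.Set.contains, hkeys, PySem.Set.mem_ofList, hm]
        rw [this, pvStepA, if_pos hc, PySem.Dict.keys_insert_of_contains _ _ hc]
      · have hc : d.contains p.2 = false := by rw [hcont]; exact decide_eq_false hm
        have : PySem.Set.add d.keys p.2 = d.keys ++ [p.2] := by
          simp [PySem.Set.add, PySem.Set.contains, hkeys, PySem.Set.mem_ofList, hm]
        rw [this, pvStepA, if_neg (by simp [hc]), PySem.Dict.keys_insert_of_not_contains _ _ hc]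
    · intro L
      by_cases hL : L = p.2
      · -- the key p.2 is created or updated
        rw [hL]
        have hmem : p.2 ∈ (ps ++ [p]).map (·.2) := by simp
        rw [if_pos hmem, pvValP, pvIdxsP_append, if_pos rfl]
        by_cases hm : p.2 ∈ ps.map (·.2)
        · have hc : d.contains p.2 = true := by rw [hcont]; exact decide_eq_true hm
          rw [pvStepA, if_pos hc, PySem.Dict.getD_insert, if_pos rfl,
              hget p.2, if_pos hm, pvValP, PySem.List.pyGetD_zero_cons, pySetD_head]
          simp only [List.cons_append, List.length_append, List.length_cons, List.length_nil]
          push_cast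
          ring_nf
        · have hc : d.contains p.2 = false := by rw [hcont]; exact decide_eq_false hm
          have hnil : pvIdxsP ps p.2 = [] := pvIdxsP_nil_of_not_mem ps p.2 hm
          rw [pvStepA, if_neg (by simp [hc]), PySem.Dict.getD_insert, if_pos rfl, hnil]
          simp
      · -- untouched key
        have hstep : (pvStepA d p).getD L [] = d.getD L [] := by
          rw [pvStepA]
          split_ifs with hc <;> rw [PySem.Dict.getD_insert, if_neg hL]
        rw [hstep, hget L, hvaleq L hL]
        simp only [hmemiff L hL]

/-- invariant of B's loop: insert-if-absent with a fixed value function -/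
theorem pvB_inv (v : Int → List Int) (q : List Int) :
    (q.foldl (fun res L => if res.contains L then res else res.insert L (v L))
      (PySem.Dict.empty : PySem.Dict Int (List Int))).keys = PySem.Set.ofList q ∧
    ∀ L, (q.foldl (fun res L => if res.contains L then res else res.insert L (v L))
      (PySem.Dict.empty : PySem.Dict Int (List Int))).getD L []
        = if L ∈ q then v L else [] := by
  induction q using List.reverseRecOn with
  | nil => simp [PySem.Set.ofList_nil, PySem.Dict.keys_empty, PySem.Dict.getD_empty]
  | append_singleton q x ih =>
    obtain ⟨hkeys, hget⟩ := ih
    rw [List.foldl_append, List.foldl_cons, List.foldl_nil]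
    set d := q.foldl (fun res L => if res.contains L then res else res.insert L (v L))
      (PySem.Dict.empty : PySem.Dict Int (List Int)) with hd
    have hcont : d.contains x = decide (x ∈ q) := by
      rw [PySem.Dict.contains_eq_decide_mem_keys, hkeys]
      simp only [PySem.Set.mem_ofList]
    constructor
    · rw [PySem.Set.ofList_append_singleton, ← hkeys]
      by_cases hm : x ∈ q
      · have hc : d.contains x = true := by rw [hcont]; exact decide_eq_true hm
        have : PySem.Set.add d.keys x = d.keys := by
          simp [PySem.Set.add, PySem.Set.contains, hkeys, PySem.Set.mem_ofList, hm]
        rw [this, if_pos hc]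
      · have hc : d.contains x = false := by rw [hcont]; exact decide_eq_false hm
        have : PySem.Set.add d.keys x = d.keys ++ [x] := by
          simp [PySem.Set.add, PySem.Set.contains, hkeys, PySem.Set.mem_ofList, hm]
        rw [this, if_neg (by simp [hc]), PySem.Dict.keys_insert_of_not_contains _ _ hc]
    · intro L
      by_cases hm : x ∈ q
      · have hc : d.contains x = true := by rw [hcont]; exact decide_eq_true hm
        rw [if_pos hc, hget L]
        by_cases hL : L ∈ q
        · rw [if_pos hL, if_pos (by simp [hL])]
        · rw [if_neg hL, if_neg (by simp [hL]; intro h; exact absurd (h ▸ hm) hL)]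
      · have hc : d.contains x = false := by rw [hcont]; exact decide_eq_false hm
        rw [if_neg (by simp [hc]), PySem.Dict.getD_insert]
        by_cases hL : L = x
        · subst hL; rw [if_pos rfl, if_pos (by simp)]
        · rw [if_neg hL, hget L]
          have : (L ∈ q ++ [x]) ↔ L ∈ q := by simp [hL]
          simp only [this]

/-- enumerate commutes with mapping over the elements -/
theorem pvEnumerate_map (f : List Int → Int) (m : List (List Int)) (s : Int) :
    PySem.List.enumerate (m.map f) s
      = (PySem.List.enumerate m s).map (fun p => (p.1, f p.2)) := by
  induction m generalizing s with
  | nil => rfl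
  | cons x xs ih => simp [PySem.List.enumerate_cons, ih]

-- ===== VERDICT (by name: the statement is the Claim_ definition above) =====
theorem fillInLens_spec : Claim_equal_fillInLens := by
  intro m _
  show fillInLens m = fillInLens_alt m
  unfold fillInLens fillInLens_alt
  set ls := m.map (fun row => PySem.List.len row) with hls
  set ps := PySem.List.enumerate ls with hps
  -- A's fold is the fold of pvStepA over the (index, length) pairs ps
  have hA : (PySem.List.pyRange 0 (PySem.List.len m) 1).foldl
      (fun lens ind =>
        let currLen : Int := PySem.List.len (PySem.List.pyGetD m ind [])
        if lens.contains currLen then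
          let v := lens.getD currLen []
          lens.insert currLen
            (PySem.List.pySetD v 0 (PySem.List.pyGetD v 0 0 + 1) ++ [ind])
        else
          lens.insert currLen [1, ind])
      (PySem.Dict.empty : PySem.Dict Int (List Int))
      = ps.foldl pvStepA PySem.Dict.empty := by
    have henum : PySem.List.pyRange 0 (PySem.List.len m) 1
        = (PySem.List.enumerate m).map (·.1) := by
      rw [PySem.List.map_fst_enumerate m 0]
      norm_num [PySem.List.len_eq]
    rw [henum, List.foldl_map]
    rw [hps, hls, pvEnumerate_map, List.foldl_map]
    apply PySem.List.foldl_congr_mem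
    intro acc p hp
    obtain ⟨k, hk, rfl⟩ := (PySem.List.mem_enumerate_iff m 0 p).mp hp
    simp only [pvStepA]
    simp [hk]
  rw [hA]
  -- B's fold is an insert-if-absent fold with a fixed value function
  set v : Int → List Int := fun L =>
    PySem.List.len ((ps.filter (fun p => p.2 == L)).map (·.1))
      :: (ps.filter (fun p => p.2 == L)).map (·.1) with hv
  show _ = (ls.foldl (fun res L => if res.contains L then res else res.insert L (v L))
      (PySem.Dict.empty : PySem.Dict Int (List Int))).items
  obtain ⟨hAkeys, hAget⟩ := pvA_inv ps
  obtain ⟨hBkeys, hBget⟩ := pvB_inv v ls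
  have hsnd : ps.map (·.2) = ls := by rw [hps]; exact PySem.List.map_snd_enumerate ls 0
  rw [PySem.Dict.items_eq_map_keys _ (by rw [hAkeys]; exact PySem.Set.nodup_ofList _) [],
      PySem.Dict.items_eq_map_keys _ (by rw [hBkeys]; exact PySem.Set.nodup_ofList _) [],
      hAkeys, hBkeys, hsnd]
  apply List.map_congr_left
  intro k hk
  have hkls : k ∈ ls := (PySem.Set.mem_ofList _ _).mp hk
  have hkps : k ∈ ps.map (·.2) := by rw [hsnd]; exact hkls
  rw [hAget k, hBget k, if_pos hkps, if_pos hkls, hv, pvValP, pvIdxsP]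
  simp [PySem.List.len_eq]
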